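-- pv_equiv track=rewrite | github.com/nishpaths/GlobeHacks | hydrawav3-app/validation/opencap_validator.py | _skip_header
-- ===== SOURCE A (Python) =====
-- from typing import List, Optional, Tuple
--
-- def _skip_header(lines: List[str]) -> Tuple[List[str], str]:
--     """
--     Skip lines up to and including 'endheader'.
--     Returns (data_lines, header_text).
--     """
--     header_lines: List[str] = []
--     data_lines: List[str] = []
--     past_header = False
--
--     for line in lines:
--         if past_header:
--             data_lines.append(line)
--         else:
--             header_lines.append(line)
--             if line.strip().lower().startswith("endheader"):
--                 past_header = True
--
--     return data_lines, "\n".join(header_lines)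
-- ===== SOURCE B (Python) =====
-- from typing import List, Tuple
--
-- def _skip_header(lines: List[str]) -> Tuple[List[str], str]:
--     """Find the endheader marker, then slice."""
--     idx = next((i for i, line in enumerate(lines)
--                 if line.strip().lower().startswith("endheader")), None)
--     if idx is None:
--         return [], "\n".join(lines)
--     return lines[idx + 1:], "\n".join(lines[:idx + 1])
-- ===== Notes on version B (the rewrite author's own statement) =====
-- stated objective: simpler
-- what changed: Replaces the flagged append-per-line loop with a search-then-slice decomposition: find the first endheader line index, then slice the list into header and data.
import Mathlib
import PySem

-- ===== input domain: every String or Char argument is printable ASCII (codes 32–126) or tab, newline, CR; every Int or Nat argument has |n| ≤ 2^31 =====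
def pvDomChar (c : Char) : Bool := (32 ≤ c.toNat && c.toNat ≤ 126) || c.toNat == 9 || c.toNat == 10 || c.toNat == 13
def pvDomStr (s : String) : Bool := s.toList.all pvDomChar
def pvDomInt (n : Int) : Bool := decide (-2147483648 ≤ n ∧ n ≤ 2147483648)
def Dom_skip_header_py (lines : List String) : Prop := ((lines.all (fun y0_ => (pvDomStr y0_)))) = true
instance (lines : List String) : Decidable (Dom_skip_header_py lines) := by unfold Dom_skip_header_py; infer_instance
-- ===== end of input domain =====

-- B replaces A's flagged append-per-line loop by a search-then-slice decomposition (simpler, same cost).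

def pvIsEndheader (line : String) : Bool :=
  PySem.Str.startswith (PySem.Str.lower (PySem.Str.strip line)) "endheader"

-- ===== PORT A =====
-- A's for-loop over the lines with accumulators header_lines/data_lines and the past_header flag
def skipHeaderLoopA (rest header data : List String) (past : Bool) : List String × String :=
  match rest with
  | [] => (data, PySem.Str.join "\n" header)
  | line :: rs =>
    if past then
      skipHeaderLoopA rs header (data ++ [line]) past
    else
      if pvIsEndheader line then
        skipHeaderLoopA rs (header ++ [line]) data true
      else
        skipHeaderLoopA rs (header ++ [line]) data false

def skip_header_py (lines : List String) : List String × String :=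
  skipHeaderLoopA lines [] [] false

-- ===== PORT B =====
def skip_header_py_alt (lines : List String) : List String × String :=
  match lines.findIdx? pvIsEndheader with
  | none => ([], PySem.Str.join "\n" lines)
  | some i => (lines.drop (i + 1), PySem.Str.join "\n" (lines.take (i + 1)))

-- ===== PRECONDITION & SPEC =====
def Spec_skip_header_py (lines : List String) (out : List String × String) : Prop := out = skip_header_py_alt lines
instance (lines : List String) (out : List String × String) : Decidable (Spec_skip_header_py lines out) := by unfold Spec_skip_header_py; infer_instance

-- ===== CLAIM (what is proved, stated in full; the proofs are below) =====
def Claim_equal_skip_header_py : Prop := ∀ (lines : List String), Dom_skip_header_py lines → Spec_skip_header_py lines (skip_header_py lines)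

-- ===== LEMMAS AND PROOFS =====
theorem skipHeaderLoopA_past (rs : List String) : ∀ (h d : List String),
    skipHeaderLoopA rs h d true = (d ++ rs, PySem.Str.join "\n" h) := by
  induction rs with
  | nil => intro h d; simp [skipHeaderLoopA]
  | cons x xs ih => intro h d; simp [skipHeaderLoopA, ih]

theorem skipHeaderLoopA_false (rs : List String) : ∀ (h : List String),
    skipHeaderLoopA rs h [] false =
      match rs.findIdx? pvIsEndheader with
      | none => ([], PySem.Str.join "\n" (h ++ rs))
      | some i => (rs.drop (i + 1), PySem.Str.join "\n" (h ++ rs.take (i + 1))) := by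
  induction rs with
  | nil => intro h; simp [skipHeaderLoopA]
  | cons x xs ih =>
    intro h
    by_cases hx : pvIsEndheader x
    · simp [skipHeaderLoopA, hx, skipHeaderLoopA_past, List.findIdx?_cons]
    · have hstep : skipHeaderLoopA (x :: xs) h [] false = skipHeaderLoopA xs (h ++ [x]) [] false := by
        simp [skipHeaderLoopA, hx]
      rw [hstep, ih (h ++ [x]), List.findIdx?_cons]
      cases hfi : xs.findIdx? pvIsEndheader <;> simp [hx]

-- ===== VERDICT (by name: the statement is the Claim_ definition above) =====
theorem skip_header_py_spec : Claim_equal_skip_header_py := by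
  intro lines _
  unfold Spec_skip_header_py skip_header_py skip_header_py_alt
  rw [skipHeaderLoopA_false]
  cases hfi : lines.findIdx? pvIsEndheader <;> simp
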